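-- pv_equiv track=rewrite | github.com/KU-BIG/graphtorch | neat_graphtorch.py | which_layer
-- ===== SOURCE A (Python) =====
-- def which_layer(total_dim, from_node_num, to_node_num):
--     #선택된 index가 어느 layer와 어느 layer에 해당하는지 list return
--     layer_idx = [0]*len(total_dim)
--
--     #아래 for문으로 짜야할듯
--     for idx in range(len(total_dim)):
--         if from_node_num <= sum(total_dim[0:(idx+1)]):
--             layer_idx[idx] = 1
--             break
--
--     for idx in range(len(total_dim)):
--         if to_node_num <= sum(total_dim[0:(idx+1)]):
--             layer_idx[idx] = 1
--             break
--
--     return layer_idx # [1,0,1,0,0] 형태로 return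
-- ===== SOURCE B (Python) =====
-- def which_layer(total_dim, from_node_num, to_node_num):
--     # One pass of prefix sums, then a single scan per node index: O(n) instead of A's O(n^2).
--     prefix = []
--     s = 0
--     for d in total_dim:
--         s += d
--         prefix.append(s)
--
--     def first_at_most(target):
--         for i, p in enumerate(prefix):
--             if target <= p:
--                 return i
--         return None
--
--     i = first_at_most(from_node_num)
--     j = first_at_most(to_node_num)
--     return [1 if k == i or k == j else 0 for k in range(len(total_dim))]
-- ===== Notes on version B (the rewrite author's own statement) =====
-- stated objective: faster
-- what changed: B computes the prefix sums once in a single pass and locates each node's layer by one scan over them (indices then rendered as a 0/1 mask), instead of A's loops that recompute sum(total_dim[0:idx+1]) from scratch at every index.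
import Mathlib
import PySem

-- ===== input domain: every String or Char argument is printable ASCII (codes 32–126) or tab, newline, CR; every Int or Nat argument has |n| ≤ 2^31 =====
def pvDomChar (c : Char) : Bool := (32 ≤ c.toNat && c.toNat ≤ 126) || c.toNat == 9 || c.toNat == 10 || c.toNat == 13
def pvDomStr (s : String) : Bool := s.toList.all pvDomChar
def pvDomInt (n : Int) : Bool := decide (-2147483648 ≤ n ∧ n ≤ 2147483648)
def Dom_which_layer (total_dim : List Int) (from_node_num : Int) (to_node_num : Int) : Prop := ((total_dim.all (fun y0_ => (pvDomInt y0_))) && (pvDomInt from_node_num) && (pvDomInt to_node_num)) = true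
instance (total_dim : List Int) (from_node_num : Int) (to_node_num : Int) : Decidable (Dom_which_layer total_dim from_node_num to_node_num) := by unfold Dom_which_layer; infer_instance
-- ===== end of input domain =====

-- B replaces A's repeated sum(total_dim[0:idx+1]) recomputation by one prefix-sum pass plus
-- one scan per node index (objective: faster, asymptotic O(n) vs O(n^2)).

-- ===== PORT A =====
-- 'for idx in range(len(total_dim)): if target <= sum(total_dim[0:idx+1]): layer_idx[idx] = 1; break'
def whichLayerLoopA (total_dim : List Int) (target : Int) : List Int → List Nat → List Int
  | layer_idx, [] => layer_idx
  | layer_idx, idx :: rest =>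
    if target ≤ (PySem.List.slice total_dim (some 0) (some ((idx : Int) + 1))).sum then
      layer_idx.set idx 1
    else
      whichLayerLoopA total_dim target layer_idx rest

def which_layer (total_dim : List Int) (from_node_num : Int) (to_node_num : Int) : List Int :=
  let layer_idx := List.replicate total_dim.length (0 : Int)
  let layer_idx := whichLayerLoopA total_dim from_node_num layer_idx (List.range total_dim.length)
  let layer_idx := whichLayerLoopA total_dim to_node_num layer_idx (List.range total_dim.length)
  layer_idx

-- ===== PORT B =====
-- prefix-sum pass: 's += d; prefix.append(s)'
def wlPrefix : List Int → Int → List Int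
  | [], _ => []
  | d :: rest, s => (s + d) :: wlPrefix rest (s + d)

-- 'for i, p in enumerate(prefix): if target <= p: return i' ; 'return None'
def wlFirstAtMost (target : Int) : List Int → Nat → Option Nat
  | [], _ => none
  | p :: rest, i => if target ≤ p then some i else wlFirstAtMost target rest (i + 1)

def which_layer_alt (total_dim : List Int) (from_node_num : Int) (to_node_num : Int) : List Int :=
  let pfx := wlPrefix total_dim 0
  let i := wlFirstAtMost from_node_num pfx 0
  let j := wlFirstAtMost to_node_num pfx 0
  (List.range total_dim.length).map (fun k => if some k = i ∨ some k = j then (1 : Int) else 0)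

-- ===== PRECONDITION & SPEC =====
def Spec_which_layer (total_dim : List Int) (from_node_num : Int) (to_node_num : Int) (out : List Int) : Prop := out = which_layer_alt total_dim from_node_num to_node_num
instance (total_dim : List Int) (from_node_num : Int) (to_node_num : Int) (out : List Int) : Decidable (Spec_which_layer total_dim from_node_num to_node_num out) := by unfold Spec_which_layer; infer_instance

-- ===== CLAIM (what is proved, stated in full; the proofs are below) =====
def Claim_equal_which_layer : Prop := ∀ (total_dim : List Int) (from_node_num : Int) (to_node_num : Int), Dom_which_layer total_dim from_node_num to_node_num → Spec_which_layer total_dim from_node_num to_node_num (which_layer total_dim from_node_num to_node_num)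

-- ===== LEMMAS AND PROOFS =====

-- common search: first index idx with target ≤ s + sum (take (idx+1) td)
def wlF (target : Int) : List Int → Int → Option Nat
  | [], _ => none
  | d :: rest, s => if target ≤ s + d then some 0 else (wlF target rest (s + d)).map (· + 1)

theorem wlF_lt {target : Int} : ∀ (td : List Int) (s : Int) (i : Nat),
    wlF target td s = some i → i < td.length := by
  intro td
  induction td with
  | nil => intro s i h; simp [wlF] at h
  | cons d rest ih =>
    intro s i h
    simp only [wlF] at h
    split at h
    · simp only [Option.some.injEq] at h
      simp [← h]
    · simp only [Option.map_eq_some_iff] at h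
      obtain ⟨j, hj, rfl⟩ := h
      have := ih (s + d) j hj
      simp
      omega

theorem wlFirstAtMost_eq {target : Int} : ∀ (td : List Int) (s : Int) (c : Nat),
    wlFirstAtMost target (wlPrefix td s) c = (wlF target td s).map (· + c) := by
  intro td
  induction td with
  | nil => intro s c; simp [wlPrefix, wlFirstAtMost, wlF]
  | cons d rest ih =>
    intro s c
    simp only [wlPrefix, wlFirstAtMost, wlF]
    split
    · simp
    · rw [ih (s + d) (c + 1)]
      cases wlF target rest (s + d) with
      | none => simp
      | some a => simp; omega

-- A's break-loop over an explicit index list is a find-and-set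
theorem whichLayerLoopA_eq_find (total_dim : List Int) (target : Int) :
    ∀ (idxs : List Nat) (l : List Int),
      whichLayerLoopA total_dim target l idxs =
        match idxs.find? (fun (idx : Nat) => decide (target ≤ (PySem.List.slice total_dim (some 0) (some ((idx : Int) + 1))).sum)) with
        | some i => l.set i 1
        | none => l := by
  intro idxs
  induction idxs with
  | nil => intro l; simp [whichLayerLoopA]
  | cons idx rest ih =>
    intro l
    rw [List.find?_cons]
    by_cases h : target ≤ (PySem.List.slice total_dim (some 0) (some ((idx : Int) + 1))).sum
    all_goals simp only [PySem.List.slice_zero_start] at h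
    · simp [whichLayerLoopA, h]
    · simp only [whichLayerLoopA]
      rw [ih l]
      simp [h]

-- the searched condition over range(n) equals wlF
theorem find_range_eq_wlF (target : Int) :
    ∀ (td : List Int) (s : Int),
      (List.range td.length).find? (fun idx => decide (target ≤ s + (td.take (idx + 1)).sum)) = wlF target td s := by
  intro td
  induction td with
  | nil => intro s; simp [wlF]
  | cons d rest ih =>
    intro s
    rw [List.length_cons, List.range_succ_eq_map, List.find?_cons]
    by_cases h : target ≤ s + d
    · simp [wlF, h]
    · have h0 : (decide (target ≤ s + ((d :: rest).take (0 + 1)).sum)) = false := by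
        simp [h]
      rw [h0, List.find?_map]
      have hfun : ((fun idx => decide (target ≤ s + ((d :: rest).take (idx + 1)).sum)) ∘ Nat.succ)
          = (fun idx => decide (target ≤ s + d + (rest.take (idx + 1)).sum)) := by
        funext idx
        simp only [Function.comp, List.take_succ_cons, List.sum_cons]
        congr 1
        rw [Int.add_assoc]
      rw [hfun, ih (s + d)]
      simp [wlF, h]

-- A's slice condition equals the take condition
theorem slice_cond_eq (td : List Int) (idx : Nat) :
    (PySem.List.slice td (some 0) (some ((idx : Int) + 1))).sum = (td.take (idx + 1)).sum := by
  have h : ((idx : Int) + 1) = ((idx + 1 : Nat) : Int) := by push_cast; ring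
  rw [h, PySem.List.slice_zero_start, PySem.List.slice_to_natCast]

theorem which_layer_eq_alt (total_dim : List Int) (f t : Int) :
    which_layer total_dim f t = which_layer_alt total_dim f t := by
  unfold which_layer which_layer_alt
  dsimp only
  rw [whichLayerLoopA_eq_find, whichLayerLoopA_eq_find]
  rw [wlFirstAtMost_eq, wlFirstAtMost_eq]
  have hc : ∀ (target : Int),
      (List.range total_dim.length).find? (fun (idx : Nat) => decide (target ≤ (PySem.List.slice total_dim (some 0) (some ((idx : Int) + 1))).sum))
        = wlF target total_dim 0 := by
    intro target
    rw [← find_range_eq_wlF]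
    have hfun : (fun (idx : Nat) => decide (target ≤ (PySem.List.slice total_dim (some 0) (some ((idx : Int) + 1))).sum))
        = (fun idx => decide (target ≤ (0 : Int) + (total_dim.take (idx + 1)).sum)) := by
      funext idx
      rw [slice_cond_eq]
      simp
    rw [hfun]
  rw [hc f, hc t]
  have hmap : ∀ o : Option Nat, o.map (· + 0) = o := by intro o; cases o <;> simp
  rw [hmap, hmap]
  have key : ∀ (oi oj : Option Nat),
      (∀ i, oi = some i → i < total_dim.length) →
      (∀ j, oj = some j → j < total_dim.length) →
      (match oj with
        | some j => (match oi with
            | some i => (List.replicate total_dim.length (0 : Int)).set i 1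
            | none => List.replicate total_dim.length (0 : Int)).set j 1
        | none => match oi with
            | some i => (List.replicate total_dim.length (0 : Int)).set i 1
            | none => List.replicate total_dim.length (0 : Int)) =
      (List.range total_dim.length).map (fun k => if some k = oi ∨ some k = oj then (1 : Int) else 0) := by
    intro oi oj hoi hoj
    apply List.ext_getElem
    · cases oi <;> cases oj <;> simp
    · intro k h1 h2
      have hk : k < total_dim.length := by simpa using h2
      cases oi with
      | none =>
        cases oj with
        | none => simp
        | some j =>
          simp [List.getElem_set]
          by_cases hkj : j = k <;> simp [hkj]
          intro hcx; exact absurd hcx.symm hkj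
      | some i =>
        cases oj with
        | none =>
          simp [List.getElem_set]
          by_cases hki : i = k <;> simp [hki]
          intro hcx; exact absurd hcx.symm hki
        | some j =>
          simp [List.getElem_set]
          by_cases hkj : j = k
          · simp [hkj]
          · by_cases hki : i = k
            · simp [hki, hkj]
            · simp [hki, hkj]
              omega
  exact key (wlF f total_dim 0) (wlF t total_dim 0)
    (fun i hi => wlF_lt total_dim 0 i hi) (fun j hj => wlF_lt total_dim 0 j hj)

-- ===== VERDICT (by name: the statement is the Claim_ definition above) =====
theorem which_layer_spec : Claim_equal_which_layer := by
  intro total_dim f t _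
  unfold Spec_which_layer
  exact which_layer_eq_alt total_dim f t
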